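-- pv_equiv track=rewrite | github.com/Ahyg/FlowTok | data/DatasetBuilder.py | _group_by_day
-- ===== SOURCE A (Python) =====
-- def _group_by_day(all_files):
--     """
--     Input all_files = [(time_str, path), ...]
--     Output:
--         day_to_times: { 'YYYYMMDD': [time_str1, time_str2, ...] }
--         time_to_path: { time_str: full_path }
--     """
--     day_to_times = {}
--     time_to_path = {}
--
--     for t, path in all_files:
--         day = t[:8]
--         time_to_path[t] = path
--         day_to_times.setdefault(day, []).append(t)
--
--     # Sort times within each day
--     for day in day_to_times:
--         day_to_times[day].sort()
--
--     return day_to_times, time_to_path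
-- ===== SOURCE B (Python) =====
-- def _group_by_day(all_files):
--     """
--     Input all_files = [(time_str, path), ...]
--     Output:
--         day_to_times: { 'YYYYMMDD': [time_str1, time_str2, ...] }
--         time_to_path: { time_str: full_path }
--     """
--     time_to_path = {t: path for t, path in all_files}
--     # register each day once, in first-occurrence order
--     day_to_times = {t[:8]: [] for t, _ in all_files}
--     # one global sort; distributing sorted times leaves every bucket sorted
--     for t in sorted(t for t, _ in all_files):
--         day_to_times[t[:8]].append(t)
--     return day_to_times, time_to_path
-- ===== Notes on version B (the rewrite author's own statement) =====
-- stated objective: alternative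
-- what changed: Instead of grouping times into per-day buckets and then sorting each bucket, B performs one global sort of all times and distributes them into pre-registered day buckets in a single pass, so every bucket emerges already sorted; time_to_path and the day-key insertion order are built the same way.
import Mathlib
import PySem

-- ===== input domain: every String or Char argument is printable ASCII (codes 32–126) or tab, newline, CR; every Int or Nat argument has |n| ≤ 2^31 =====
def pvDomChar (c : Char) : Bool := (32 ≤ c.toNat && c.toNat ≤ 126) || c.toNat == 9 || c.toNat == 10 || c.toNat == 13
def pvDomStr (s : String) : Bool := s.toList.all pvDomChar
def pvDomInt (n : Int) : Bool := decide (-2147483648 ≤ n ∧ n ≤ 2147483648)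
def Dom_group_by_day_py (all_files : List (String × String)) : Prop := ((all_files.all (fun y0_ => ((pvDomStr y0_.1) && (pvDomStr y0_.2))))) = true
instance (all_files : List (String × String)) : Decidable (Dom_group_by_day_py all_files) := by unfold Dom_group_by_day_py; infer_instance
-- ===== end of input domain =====

-- B replaces group-then-sort-each-bucket by one global sort followed by a single distributing pass (objective: alternative decomposition, same asymptotic cost).

-- ===== PORT A =====
-- A: one loop filling time_to_path and appending t to day_to_times[t[:8]] (setdefault+append = Dict.modify), then a second loop sorting each day's list.
def group_by_day_py (all_files : List (String × String)) : (List (String × List String)) × (List (String × String)) :=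
  let st := all_files.foldl
    (fun (st : PySem.Dict String (List String) × PySem.Dict String String) tp =>
      (st.1.modify (PySem.Str.slice tp.1 none (some 8)) [] (fun l => l ++ [tp.1]),
       st.2.insert tp.1 tp.2))
    (PySem.Dict.empty, PySem.Dict.empty)
  (st.1.items.map (fun p => (p.1, PySem.List.sorted p.2 (fun x => x) false)), st.2.items)

-- ===== PORT B =====
-- B: build time_to_path; register each day once with an empty bucket; sort ALL times once; distribute them in one pass (buckets come out sorted).
def group_by_day_py_alt (all_files : List (String × String)) : (List (String × List String)) × (List (String × String)) :=
  let time_to_path := all_files.foldl (fun d tp => d.insert tp.1 tp.2) (PySem.Dict.empty : PySem.Dict String String)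
  let d0 := all_files.foldl (fun d tp => d.insert (PySem.Str.slice tp.1 none (some 8)) ([] : List String)) PySem.Dict.empty
  let times := PySem.List.sorted (all_files.map (fun tp => tp.1)) (fun x => x) false
  let day_to_times := times.foldl (fun d t => d.modify (PySem.Str.slice t none (some 8)) [] (fun l => l ++ [t])) d0
  (day_to_times.items, time_to_path.items)

-- ===== PRECONDITION & SPEC =====
def Spec_group_by_day_py (all_files : List (String × String)) (out : (List (String × List String)) × (List (String × String))) : Prop := out = group_by_day_py_alt all_files
instance (all_files : List (String × String)) (out : (List (String × List String)) × (List (String × String))) : Decidable (Spec_group_by_day_py all_files out) := by unfold Spec_group_by_day_py; infer_instance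

-- ===== CLAIM (what is proved, stated in full; the proofs are below) =====
def Claim_equal_group_by_day_py : Prop := ∀ (all_files : List (String × String)), Dom_group_by_day_py all_files → Spec_group_by_day_py all_files (group_by_day_py all_files)

-- ===== LEMMAS AND PROOFS =====

-- Python's set.update(l) leaves the set unchanged when every element of l is already in it.
theorem pv_set_update_of_subset {α : Type} [BEq α] [LawfulBEq α] (l : List α) (s : PySem.Set α)
    (h : ∀ x ∈ l, x ∈ s) : PySem.Set.update s l = s := by
  induction l generalizing s with
  | nil => rfl
  | cons x xs ih =>
      have hx : PySem.Set.add s x = s := by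
        simp [PySem.Set.add, PySem.Set.contains, h x (by simp)]
      show PySem.Set.update (PySem.Set.add s x) xs = s
      rw [hx]
      exact ih s (fun y hy => h y (by simp [hy]))

-- the bucket-append loop (generic key/value projections), read off a key
theorem pv_getD_modify_gen {β : Type} (key val : β → String) (l : List β)
    (d : PySem.Dict String (List String)) (c : String) :
    (l.foldl (fun d x => d.modify (key x) [] (fun xs => xs ++ [val x])) d).getD c [] =
      d.getD c [] ++ ((l.filter (fun x => key x == c)).map val) := by
  have h := PySem.Dict.getD_foldl_modify_append (l.map (fun x => (key x, val x))) d c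
  rw [List.foldl_map] at h
  simpa [List.filter_map, Function.comp] using h

-- inserting [] at any keys keeps every getD-with-[] equal to []
theorem pv_getD_insert_nil {β : Type} (key : β → String) (l : List β)
    (d : PySem.Dict String (List String)) (c : String) (h : d.getD c [] = []) :
    (l.foldl (fun d x => d.insert (key x) ([] : List String)) d).getD c [] = [] := by
  induction l generalizing d with
  | nil => exact h
  | cons x xs ih =>
      refine ih _ ?_
      rw [PySem.Dict.getD_insert]
      split <;> simp [h]

-- filtering commutes with Python's (stable) sort for the identity key: both sides are
-- sorted permutations of the same list, hence equal.
theorem pv_sorted_filter_comm (xs : List String) (p : String → Bool) :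
    PySem.List.sorted (xs.filter p) (fun x => x) false =
      (PySem.List.sorted xs (fun x => x) false).filter p := by
  refine PySem.List.eq_of_perm_of_pairwise_le_of_injective (fun x => x) (fun _ _ h => h) ?_ ?_ ?_
  · exact (PySem.List.sorted_perm _ _ _).trans ((PySem.List.sorted_perm xs _ _).filter p).symm
  · exact PySem.List.sorted_pairwise _ _
  · exact (PySem.List.sorted_pairwise xs _).filter _

-- ===== VERDICT (by name: the statement is the Claim_ definition above) =====
theorem group_by_day_py_spec : Claim_equal_group_by_day_py := by
  intro all_files _
  show group_by_day_py all_files = group_by_day_py_alt all_files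
  simp only [group_by_day_py, group_by_day_py_alt]
  rw [PySem.List.foldl_prod_mk
        (f := fun (d : PySem.Dict String (List String)) (tp : String × String) =>
          d.modify (PySem.Str.slice tp.1 none (some 8)) [] (fun l => l ++ [tp.1]))
        (g := fun (d : PySem.Dict String String) (tp : String × String) =>
          d.insert tp.1 tp.2)]
  refine Prod.ext ?_ rfl
  -- names for the three dictionaries involved
  set day : String → String := fun t => PySem.Str.slice t none (some 8) with hday
  set dA := all_files.foldl
      (fun (d : PySem.Dict String (List String)) tp =>
        d.modify (day tp.1) [] (fun l => l ++ [tp.1])) PySem.Dict.empty with hdA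
  set d0 := all_files.foldl
      (fun (d : PySem.Dict String (List String)) tp =>
        d.insert (day tp.1) ([] : List String)) PySem.Dict.empty with hd0
  set ts := PySem.List.sorted (all_files.map (fun tp => tp.1)) (fun x => x) false with hts
  set dB := ts.foldl (fun d t => d.modify (day t) [] (fun l => l ++ [t])) d0 with hdB
  -- key lists agree
  have hKA : dA.keys = PySem.Set.update [] (all_files.map (fun tp => day tp.1)) := by
    rw [hdA, PySem.Dict.keys_foldl_modify_key all_files (fun (tp : String × String) => day tp.1)
          ([] : List String) (fun _ tp => fun l => l ++ [tp.1]), PySem.Dict.keys_empty]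
  have hK0 : d0.keys = PySem.Set.update [] (all_files.map (fun tp => day tp.1)) := by
    rw [hd0, PySem.Dict.keys_foldl_insert_key all_files (fun (tp : String × String) => day tp.1)
          (fun _ _ => ([] : List String)), PySem.Dict.keys_empty]
  have hmem : ∀ x ∈ ts.map day, x ∈ d0.keys := by
    intro x hx
    rw [hK0]
    have : (ts.map day).Perm ((all_files.map (fun tp => tp.1)).map day) :=
      (PySem.List.sorted_perm _ _ _).map day
    have hx' : x ∈ (all_files.map (fun tp => tp.1)).map day := this.mem_iff.mp hx
    rw [List.map_map] at hx'
    exact (PySem.Set.mem_ofList _ _).mpr hx'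
  have hKB : dB.keys = d0.keys := by
    rw [hdB, PySem.Dict.keys_foldl_modify_key _ day ([] : List String) (fun _ t => fun l => l ++ [t])]
    exact pv_set_update_of_subset _ _ hmem
  have hnodA : dA.keys.Nodup := by
    rw [hdA]
    exact PySem.Dict.nodup_keys_foldl_modify_key _ _ _ _ _ (by simp [PySem.Dict.keys_empty])
  have hnodB : dB.keys.Nodup := by
    rw [hdB]
    refine PySem.Dict.nodup_keys_foldl_modify_key _ _ _ _ _ ?_
    rw [hd0]
    exact PySem.Dict.nodup_keys_foldl_insert_key _ _ _ _ (by simp [PySem.Dict.keys_empty])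
  -- per-key values agree
  have hvals : ∀ c : String,
      PySem.List.sorted (dA.getD c []) (fun x => x) false = dB.getD c [] := by
    intro c
    have hA : dA.getD c [] = (all_files.filter (fun tp => day tp.1 == c)).map (fun tp => tp.1) := by
      rw [hdA, pv_getD_modify_gen (fun (tp : String × String) => day tp.1) (fun (tp : String × String) => tp.1)]
      simp
    have hB : dB.getD c [] = (ts.filter (fun t => day t == c)) := by
      rw [hdB, pv_getD_modify_gen day (fun (t : String) => t)]
      rw [hd0, pv_getD_insert_nil (fun (tp : String × String) => day tp.1) all_files PySem.Dict.empty c (PySem.Dict.getD_empty c [])]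
      simp
    rw [hA, hB, hts, ← pv_sorted_filter_comm]
    congr 1
    rw [List.filter_map]
    rfl
  -- assemble via the items = keys.map (getD ·) characterisation
  rw [PySem.Dict.items_eq_map_keys dA hnodA [], PySem.Dict.items_eq_map_keys dB hnodB [],
      hKB, hK0, ← hKA, List.map_map]
  exact List.map_congr_left (fun k _ => by simp [Function.comp, hvals k])
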